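-- pv_equiv track=rewrite | github.com/mainmanchandler/Cryptography-Classical-Ciphers | Matrix Object Class, Hill Cipher, PRNG's/utilities.py | index_2d
-- ===== SOURCE A (Python) =====
-- def index_2d(input_list,item):
--     """
--     ----------------------------------------------------
--     Parameters:   input_list (list): 2D list
--                   item (?)
--     Return:       i (int): row number
--                   j (int): column number
--     Description:  Performs linear search on input list to find "item"
--                   returns i,j, where i is the row number and j is the column number
--                   if not found returns -1,-1
--     Asserts:      input_list is a list
--     ---------------------------------------------------
--     """
--
--     assert type(input_list) is list, 'invalid input'
--
--     x = -1
--     y = -1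
--     row = 0
--     col = 0
--
--     for i in input_list:
--         row += 1
--         for j in i:
--             col += 1
--             if j == item:
--                 x = row-1
--                 y = col-1
--                 break #no need to continue
--         col = 0
--
--     return x, y
-- ===== SOURCE B (Python) =====
-- def index_2d(input_list, item):
--     assert type(input_list) is list, 'invalid input'
--     for i in range(len(input_list) - 1, -1, -1):
--         row = input_list[i]
--         for j in range(len(row)):
--             if row[j] == item:
--                 return i, j
--     return -1, -1
-- ===== Notes on version B (the rewrite author's own statement) =====
-- stated objective: alternative
-- what changed: A scans all rows forward, overwriting the answer on every row that contains the item (so the last matching row wins); B iterates rows from last to first and returns immediately at the first match, which is the same (row, col) without accumulation.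
import Mathlib
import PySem

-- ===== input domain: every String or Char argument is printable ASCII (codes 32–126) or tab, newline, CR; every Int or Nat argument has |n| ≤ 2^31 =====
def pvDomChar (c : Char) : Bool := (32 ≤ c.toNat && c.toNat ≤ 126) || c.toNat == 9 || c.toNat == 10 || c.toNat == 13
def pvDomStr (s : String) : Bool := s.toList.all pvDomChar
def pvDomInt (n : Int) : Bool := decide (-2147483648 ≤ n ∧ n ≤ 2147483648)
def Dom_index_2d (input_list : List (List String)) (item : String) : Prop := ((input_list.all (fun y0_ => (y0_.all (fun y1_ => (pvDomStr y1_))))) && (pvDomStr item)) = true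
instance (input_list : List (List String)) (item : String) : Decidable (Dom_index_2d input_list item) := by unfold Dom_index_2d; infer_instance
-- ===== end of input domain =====

-- B replaces A's forward scan with overwrite-on-match by a last-to-first row scan with early exit (alternative decomposition, same cost).

-- ===== PORT A =====
-- inner 'for j in i' loop: col counter, break on first match writing (row-1, col-1)
def index_2d_inner (l : List String) (item : String) (x y col rowMinus1 : Int) : Int × Int :=
  match l with
  | [] => (x, y)
  | j :: rest =>
    let col := col + 1
    if j == item then (rowMinus1, col - 1)
    else index_2d_inner rest item x y col rowMinus1

-- outer 'for i in input_list' loop: row counter, col reset to 0 each row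
def index_2d_loop (rows : List (List String)) (item : String) (x y row : Int) : Int × Int :=
  match rows with
  | [] => (x, y)
  | i :: rest =>
    let row := row + 1
    let r := index_2d_inner i item x y 0 (row - 1)
    index_2d_loop rest item r.1 r.2 row

def index_2d (input_list : List (List String)) (item : String) : Int × Int :=
  index_2d_loop input_list item (-1) (-1) 0

-- ===== PORT B =====
-- inner 'for j in range(len(row))' loop: first column index where row[j] == item
def index_2d_alt_col (row : List String) (item : String) (j : Int) : Option Int :=
  match row with
  | [] => none
  | s :: rest => if s == item then some j else index_2d_alt_col rest item (j + 1)

-- 'for i in range(len(input_list)-1, -1, -1)': rows from last to first, return on first match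
def index_2d_alt_loop (revRows : List (List String)) (item : String) (i : Int) : Int × Int :=
  match revRows with
  | [] => (-1, -1)
  | r :: rest =>
    match index_2d_alt_col r item 0 with
    | some j => (i, j)
    | none => index_2d_alt_loop rest item (i - 1)

def index_2d_alt (input_list : List (List String)) (item : String) : Int × Int :=
  index_2d_alt_loop input_list.reverse item ((input_list.length : Int) - 1)

-- ===== PRECONDITION & SPEC =====
def Spec_index_2d (input_list : List (List String)) (item : String) (out : Int × Int) : Prop := out = index_2d_alt input_list item
instance (input_list : List (List String)) (item : String) (out : Int × Int) : Decidable (Spec_index_2d input_list item out) := by unfold Spec_index_2d; infer_instance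

-- ===== CLAIM (what is proved, stated in full; the proofs are below) =====
def Claim_equal_index_2d : Prop := ∀ (input_list : List (List String)) (item : String), Dom_index_2d input_list item → Spec_index_2d input_list item (index_2d input_list item)

-- ===== LEMMAS AND PROOFS =====

theorem alt_col_shift (l : List String) (item : String) (c : Int) :
    index_2d_alt_col l item c = (index_2d_alt_col l item 0).map (· + c) := by
  induction l generalizing c with
  | nil => simp [index_2d_alt_col]
  | cons s rest ih =>
    simp only [index_2d_alt_col]
    by_cases h : s == item
    · simp [h]
    · simp only [h, Bool.false_eq_true, if_false]
      norm_num
      rw [ih (c + 1), ih 1]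
      cases index_2d_alt_col rest item 0 <;> simp <;> ring

theorem alt_col_isSome (l : List String) (item : String) :
    (index_2d_alt_col l item 0).isSome = l.any (· == item) := by
  induction l with
  | nil => simp [index_2d_alt_col]
  | cons s rest ih =>
    simp only [index_2d_alt_col, List.any_cons]
    by_cases h : s == item
    · simp [h]
    · simp only [h, Bool.false_eq_true, if_false, Bool.false_or]
      norm_num
      rw [alt_col_shift rest item 1]
      simpa using ih

theorem inner_eq (l : List String) (item : String) (x y col r : Int) :
    index_2d_inner l item x y col r =
      match index_2d_alt_col l item 0 with
      | some j => (r, col + j)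
      | none => (x, y) := by
  induction l generalizing col with
  | nil => simp [index_2d_inner, index_2d_alt_col]
  | cons s rest ih =>
    simp only [index_2d_inner, index_2d_alt_col]
    by_cases h : s == item
    · simp [h]
    · simp only [h, Bool.false_eq_true, if_false]
      norm_num
      rw [ih (col + 1), alt_col_shift rest item 1]
      cases index_2d_alt_col rest item 0 <;> simp <;> ring

theorem alt_loop_append (a b : List (List String)) (item : String) (k : Int) :
    index_2d_alt_loop (a ++ b) item k =
      if a.any (fun r => r.any (· == item))
      then index_2d_alt_loop a item k
      else index_2d_alt_loop b item (k - a.length) := by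
  induction a generalizing k with
  | nil => simp [index_2d_alt_loop]
  | cons r rest ih =>
    simp only [List.cons_append, index_2d_alt_loop, List.any_cons]
    rcases hc : index_2d_alt_col r item 0 with _ | j
    · have hr : (r.any (· == item)) = false := by
        have := alt_col_isSome r item; rw [hc] at this; simpa using this.symm
      rw [ih (k - 1)]
      simp only [hr, Bool.false_or]
      split_ifs with h
      · rfl
      · have : k - 1 - (rest.length : Int) = k - ((rest.length : Int) + 1) := by ring
        simp [this]
    · have hr : (r.any (· == item)) = true := by
        have := alt_col_isSome r item; rw [hc] at this; simpa using this.symm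
      simp [hr]

theorem alt_loop_notfound (rows : List (List String)) (item : String) (k : Int)
    (h : rows.any (fun r => r.any (· == item)) = false) :
    index_2d_alt_loop rows item k = (-1, -1) := by
  induction rows generalizing k with
  | nil => simp [index_2d_alt_loop]
  | cons r rest ih =>
    simp only [List.any_cons, Bool.or_eq_false_iff] at h
    have hc : index_2d_alt_col r item 0 = none := by
      have := alt_col_isSome r item
      rw [h.1] at this
      exact Option.not_isSome_iff_eq_none.mp (by simp [this])
    simp [index_2d_alt_loop, hc, ih _ h.2]

theorem loop_eq (rows : List (List String)) (item : String) (x y row : Int) :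
    index_2d_loop rows item x y row =
      if rows.any (fun r => r.any (· == item))
      then index_2d_alt_loop rows.reverse item (row + rows.length - 1)
      else (x, y) := by
  induction rows generalizing x y row with
  | nil => simp [index_2d_loop]
  | cons i rest ih =>
    simp only [index_2d_loop, List.reverse_cons, List.any_cons, List.length_cons]
    rw [inner_eq, ih]
    have hk : row + ((rest.length : Int) + 1) - 1 = row + 1 + (rest.length : Int) - 1 := by ring
    push_cast
    rw [hk, alt_loop_append rest.reverse [i] item (row + 1 + (rest.length : Int) - 1)]
    rcases hc : index_2d_alt_col i item 0 with _ | j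
    · have hi : (i.any (· == item)) = false := by
        have := alt_col_isSome i item; rw [hc] at this; simpa using this.symm
      simp only [hi, Bool.false_or, List.any_reverse, hc]
      split_ifs <;> rfl
    · have hi : (i.any (· == item)) = true := by
        have := alt_col_isSome i item; rw [hc] at this; simpa using this.symm
      simp only [hi, Bool.true_or, if_true, List.any_reverse]
      split_ifs with h
      · rfl
      · simp only [index_2d_alt_loop, hc, List.length_reverse]
        have : row + 1 + (rest.length : Int) - 1 - (rest.length : Int) = row + 1 - 1 := by ring
        simp [this]

-- ===== VERDICT (by name: the statement is the Claim_ definition above) =====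
theorem index_2d_spec : Claim_equal_index_2d := by
  intro input_list item _
  unfold Spec_index_2d index_2d index_2d_alt
  rw [loop_eq]
  split_ifs with h
  · norm_num
  · rw [alt_loop_notfound _ _ _ (by simpa [List.any_reverse] using h)]
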